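-- pv_equiv track=rewrite | github.com/yushyn-andriy/algo | competitions/onlinejudge/unsorted/1585/p1585.py | solve
-- ===== SOURCE A (Python) =====
-- def solve(row):
--     total_score = 0
--     current_score = 0
--     for ch in row:
--         if ch == 'X':
--             current_score = 0
--         else:
--             current_score += 1
--             total_score += current_score
--     return total_score
-- ===== SOURCE B (Python) =====
-- def solve(row):
--     # Segment the row into maximal non-'X' runs and add the closed-form
--     # triangular score of each run, instead of a per-character accumulator.
--     return sum(len(run) * (len(run) + 1) // 2 for run in row.split('X'))
-- ===== Notes on version B (the rewrite author's own statement) =====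
-- stated objective: faster
-- what changed: Replaces the per-character running-score accumulator with split('X') into runs and a closed-form triangular number len*(len+1)//2 per run.
import Mathlib
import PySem

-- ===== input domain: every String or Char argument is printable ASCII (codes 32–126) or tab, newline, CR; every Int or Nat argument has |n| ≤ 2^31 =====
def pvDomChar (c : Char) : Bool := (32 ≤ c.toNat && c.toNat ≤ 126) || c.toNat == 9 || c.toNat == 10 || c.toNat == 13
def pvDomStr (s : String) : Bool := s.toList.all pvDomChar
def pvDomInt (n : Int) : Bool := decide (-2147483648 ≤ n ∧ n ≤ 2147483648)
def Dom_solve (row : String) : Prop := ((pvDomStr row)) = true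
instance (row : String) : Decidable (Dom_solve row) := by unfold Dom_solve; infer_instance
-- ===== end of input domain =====

-- B replaces A's per-character running accumulator by splitting the row at 'X'
-- into runs and summing the closed-form triangular score len*(len+1)//2 per run.


-- ===== PORT A =====
-- for ch in row: if ch == 'X': current = 0 else: current += 1; total += current
def solve (row : String) : Int :=
  (row.toList.foldl
    (fun st ch => if ch = 'X' then (st.1, (0 : Int)) else (st.1 + (st.2 + 1), st.2 + 1))
    ((0 : Int), (0 : Int))).1

-- ===== PORT B =====
-- sum(len(run) * (len(run) + 1) // 2 for run in row.split('X'))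
def solve_alt (row : String) : Int :=
  ((PySem.Chars.splitOn row.toList ['X']).map
    (fun run => PySem.Int.floordiv ((run.length : Int) * ((run.length : Int) + 1)) 2)).sum

-- ===== PRECONDITION & SPEC =====
def Spec_solve (row : String) (out : Int) : Prop := out = solve_alt row
instance (row : String) (out : Int) : Decidable (Spec_solve row out) := by unfold Spec_solve; infer_instance

-- ===== CLAIM (what is proved, stated in full; the proofs are below) =====
def Claim_equal_solve : Prop := ∀ (row : String), Dom_solve row → Spec_solve row (solve row)

-- ===== LEMMAS AND PROOFS =====

-- Accumulator-free description of splitting at 'X' (cur holds the current run reversed).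
def splitAuxX (cur : List Char) : List Char → List (List Char)
  | [] => [cur.reverse]
  | c :: rest => if c = 'X' then cur.reverse :: splitAuxX [] rest else splitAuxX (c :: cur) rest

def triN (n : Nat) : Nat := n * (n + 1) / 2

lemma triN_succ (n : Nat) : triN (n + 1) = triN n + (n + 1) := by
  have h : (n + 1) * (n + 1 + 1) = n * (n + 1) + (n + 1) * 2 := by ring
  simp [triN, h, Nat.add_mul_div_right]

lemma tri_floordiv (n : Nat) :
    PySem.Int.floordiv ((n : Int) * ((n : Int) + 1)) 2 = ((triN n : Nat) : Int) := by
  have h : ((n : Int) * ((n : Int) + 1)) = ((n * (n + 1) : Nat) : Int) := by push_cast; ring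
  rw [h, triN]
  exact_mod_cast PySem.Int.floordiv_natCast (n * (n + 1)) 2

lemma splitOn_go_eq (fuel : Nat) :
    ∀ (l cur _acc : List Char) (accs : List (List Char)), l.length ≤ fuel →
      PySem.Chars.splitOn.go ['X'] fuel l cur accs = accs.reverse ++ splitAuxX cur l := by
  induction fuel with
  | zero =>
    intro l cur _acc accs h
    have : l = [] := List.eq_nil_of_length_eq_zero (Nat.le_zero.mp h)
    subst this
    simp [PySem.Chars.splitOn.go, splitAuxX]
  | succ fuel ih =>
    intro l cur _acc accs h
    cases l with
    | nil => simp [PySem.Chars.splitOn.go, splitAuxX]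
    | cons c rest =>
      by_cases hc : c = 'X'
      · subst hc
        have hpre : List.isPrefixOf ['X'] ('X' :: rest) = true := by
          simp [List.isPrefixOf]
        simp only [PySem.Chars.splitOn.go, hpre, if_pos, List.length_singleton,
          List.drop_succ_cons, List.drop_zero]
        rw [ih rest [] _acc (cur.reverse :: accs) (by simpa using Nat.le_of_succ_le_succ h)]
        simp [splitAuxX]
      · have hpre : List.isPrefixOf ['X'] (c :: rest) = false := by
          simp [List.isPrefixOf]
          intro hcontra; exact absurd hcontra.symm hc
        simp only [PySem.Chars.splitOn.go, hpre]
        rw [if_neg (by simp)]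
        rw [ih rest (c :: cur) _acc accs (by simpa using Nat.le_of_succ_le_succ h)]
        simp [splitAuxX, hc]

lemma splitOn_eq_splitAuxX (l : List Char) :
    PySem.Chars.splitOn l ['X'] = splitAuxX [] l := by
  have := splitOn_go_eq (l.length + 1) l [] [] [] (Nat.le_succ _)
  simpa [PySem.Chars.splitOn] using this

-- Sum of triangular scores of the runs of l, with cur the reversed current run prefix.
def triSum (cur l : List Char) : Int :=
  ((splitAuxX cur l).map (fun r => ((triN r.length : Nat) : Int))).sum

lemma foldl_eq_triSum (l : List Char) :
    ∀ (cur : List Char) (t : Int),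
      (l.foldl
        (fun st ch => if ch = 'X' then (st.1, (0 : Int)) else (st.1 + (st.2 + 1), st.2 + 1))
        (t, (cur.length : Int))).1
        = t + triSum cur l - ((triN cur.length : Nat) : Int) := by
  induction l with
  | nil => intro cur t; simp [triSum, splitAuxX]
  | cons c rest ih =>
    intro cur t
    by_cases hc : c = 'X'
    · subst hc
      have h := ih [] t
      have htz : triN 0 = 0 := rfl
      simp only [List.length_nil, Nat.cast_zero, htz, Nat.cast_zero, sub_zero] at h
      have hruns : triSum cur ('X' :: rest) = ((triN cur.length : Nat) : Int) + triSum [] rest := by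
        simp [triSum, splitAuxX]
      simp only [List.foldl_cons, reduceIte, h, hruns]
      ring
    · simp only [List.foldl_cons, if_neg hc]
      have hlen : ((cur.length : Int) + 1) = (((c :: cur).length : Nat) : Int) := by
        simp
      rw [hlen, ih (c :: cur) (t + ((c :: cur).length : Int))]
      have hruns : triSum cur (c :: rest) = triSum (c :: cur) rest := by
        simp [triSum, splitAuxX, hc]
      rw [hruns]
      have htri : ((triN (c :: cur).length : Nat) : Int)
          = ((triN cur.length : Nat) : Int) + ((c :: cur).length : Int) := by
        simp only [List.length_cons, triN_succ]
        push_cast; ring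
      rw [htri]; ring

-- ===== VERDICT (by name: the statement is the Claim_ definition above) =====
theorem solve_spec : Claim_equal_solve := by
  intro row _
  unfold Spec_solve solve solve_alt
  rw [splitOn_eq_splitAuxX]
  have h := foldl_eq_triSum row.toList [] 0
  simp only [List.length_nil, Nat.cast_zero] at h
  rw [h]
  have hmap : (splitAuxX [] row.toList).map
      (fun run => PySem.Int.floordiv ((run.length : Int) * ((run.length : Int) + 1)) 2)
      = (splitAuxX [] row.toList).map (fun r => ((triN r.length : Nat) : Int)) := by
    apply List.map_congr_left; intro r _; exact tri_floordiv r.length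
  rw [hmap]
  simp [triSum, triN]
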